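-- pv_equiv track=rewrite | github.com/scieloorg/core | journal/utils/funcs_extract_am.py | extract_issn_print_electronic
-- ===== SOURCE A (Python) =====
-- def extract_issn_print_electronic(issn_print_or_electronic):
--     """
--     issn_print_or_electronic:
--         [{'t': 'ONLIN', '_': '1677-9487'}], [{'t': 'PRINT', '_': '0034-7299'}]
--     """
--     issn_print = None
--     issn_electronic = None
--
--     if issn_print_or_electronic:
--         for issn in issn_print_or_electronic:
--             if issn.get("t") == "PRINT":
--                 issn_print = issn.get("_").strip()
--             elif issn.get("t") == "ONLIN":
--                 issn_electronic = issn.get("_").strip()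
--     return issn_print, issn_electronic
-- ===== SOURCE B (Python) =====
-- def extract_issn_print_electronic(issn_print_or_electronic):
--     def last_value(tag):
--         # scan back-to-front, stop at the first entry with this tag
--         for issn in reversed(issn_print_or_electronic or []):
--             if issn.get("t") == tag:
--                 return issn.get("_").strip()
--         return None
--     return last_value("PRINT"), last_value("ONLIN")
-- ===== Notes on version B (the rewrite author's own statement) =====
-- stated objective: alternative
-- what changed: Replaces A's forward single pass that keeps overwriting two mutable slots by two independent back-to-front searches that early-exit at the first entry carrying the wanted tag (last-wins becomes first-match-on-the-reversed-list), stripping only the returned value.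
import Mathlib
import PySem

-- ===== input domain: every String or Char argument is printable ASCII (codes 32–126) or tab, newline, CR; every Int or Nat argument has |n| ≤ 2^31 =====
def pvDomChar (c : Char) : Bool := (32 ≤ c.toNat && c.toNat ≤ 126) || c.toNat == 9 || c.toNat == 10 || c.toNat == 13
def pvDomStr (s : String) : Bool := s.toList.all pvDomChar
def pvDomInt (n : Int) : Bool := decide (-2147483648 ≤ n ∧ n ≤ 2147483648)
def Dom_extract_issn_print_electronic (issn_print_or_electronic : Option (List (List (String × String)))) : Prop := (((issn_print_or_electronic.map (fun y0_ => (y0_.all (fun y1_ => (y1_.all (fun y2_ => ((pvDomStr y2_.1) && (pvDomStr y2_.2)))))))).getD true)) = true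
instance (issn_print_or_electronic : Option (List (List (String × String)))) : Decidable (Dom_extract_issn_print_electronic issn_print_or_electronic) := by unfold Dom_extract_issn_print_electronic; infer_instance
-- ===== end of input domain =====

-- B replaces A's forward overwrite-two-slots pass by two independent back-to-front
-- early-exit searches (last-wins = first match on the reversed list); objective: alternative.


-- ===== PORT A =====
-- A's loop body: branch on issn.get("t"), overwrite the matching slot with issn.get("_").strip().
-- Where the "_" key is missing Python's .strip() raises AttributeError (excluded by Pre_);
-- there the port yields `none` via Option.map.
def pvStepA (s : Option String × Option String) (issn : List (String × String)) :
    Option String × Option String :=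
  if (PySem.Dict.mk issn).get? "t" = some "PRINT" then
    (((PySem.Dict.mk issn).get? "_").map PySem.Str.strip, s.2)
  else if (PySem.Dict.mk issn).get? "t" = some "ONLIN" then
    (s.1, ((PySem.Dict.mk issn).get? "_").map PySem.Str.strip)
  else s

def extract_issn_print_electronic (issn_print_or_electronic : Option (List (List (String × String)))) : Option String × Option String :=
  match issn_print_or_electronic with
  | none => (none, none)              -- `if issn_print_or_electronic:` false → loop skipped
  | some xs => xs.foldl pvStepA (none, none)

-- ===== PORT B =====
-- `for issn in reversed(issn_print_or_electronic or []): if issn.get("t") == tag: return issn.get("_").strip()`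
-- = find? over the reversed list; a missing "_" on the found entry raises in Python (outside Pre_),
-- here `none` via Option.map.
def pvLastValue (xs : List (List (String × String))) (tag : String) : Option String :=
  match xs.reverse.find? (fun issn => (PySem.Dict.mk issn).get? "t" == some tag) with
  | some issn => ((PySem.Dict.mk issn).get? "_").map PySem.Str.strip
  | none => none

def extract_issn_print_electronic_alt (issn_print_or_electronic : Option (List (List (String × String)))) : Option String × Option String :=
  let xs := issn_print_or_electronic.getD []    -- `issn_print_or_electronic or []`
  (pvLastValue xs "PRINT", pvLastValue xs "ONLIN")

-- ===== PRECONDITION & SPEC =====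
-- Pre_ excludes exactly the inputs on which Python A raises AttributeError (None.strip()):
-- some entry tagged PRINT or ONLIN has no "_" key. A returns on all admitted inputs.
def Pre_extract_issn_print_electronic (issn_print_or_electronic : Option (List (List (String × String)))) : Prop :=
  ∀ issn ∈ issn_print_or_electronic.getD [],
    ((PySem.Dict.mk issn).get? "t" = some "PRINT" ∨ (PySem.Dict.mk issn).get? "t" = some "ONLIN") →
    ((PySem.Dict.mk issn).get? "_").isSome
instance (issn_print_or_electronic : Option (List (List (String × String)))) : Decidable (Pre_extract_issn_print_electronic issn_print_or_electronic) := by unfold Pre_extract_issn_print_electronic; infer_instance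

def pvWitness_extract_issn_print_electronic : (Option (List (List (String × String)))) :=
  some [[("t", "PRINT"), ("_", " 0034-7299 ")], [("t", "ONLIN"), ("_", "1677-9487")]]

def Spec_extract_issn_print_electronic (issn_print_or_electronic : Option (List (List (String × String)))) (out : Option String × Option String) : Prop := out = extract_issn_print_electronic_alt issn_print_or_electronic
instance (issn_print_or_electronic : Option (List (List (String × String)))) (out : Option String × Option String) : Decidable (Spec_extract_issn_print_electronic issn_print_or_electronic out) := by unfold Spec_extract_issn_print_electronic; infer_instance

-- ===== CLAIM (what is proved, stated in full; the proofs are below) =====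
def Claim_equal_extract_issn_print_electronic : Prop := ∀ (issn_print_or_electronic : Option (List (List (String × String)))), Dom_extract_issn_print_electronic issn_print_or_electronic → Pre_extract_issn_print_electronic issn_print_or_electronic → Spec_extract_issn_print_electronic issn_print_or_electronic (extract_issn_print_electronic issn_print_or_electronic)

-- ===== LEMMAS AND PROOFS =====

-- Loop invariant: A's fold from any start state = B's back-to-front search per tag,
-- falling back to the start state when no entry carries the tag.
theorem pvFoldA_eq_lastValue (xs : List (List (String × String))) (s : Option String × Option String) :
    xs.foldl pvStepA s =
      ((match xs.reverse.find? (fun issn => (PySem.Dict.mk issn).get? "t" == some "PRINT") with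
        | some issn => ((PySem.Dict.mk issn).get? "_").map PySem.Str.strip | none => s.1),
       (match xs.reverse.find? (fun issn => (PySem.Dict.mk issn).get? "t" == some "ONLIN") with
        | some issn => ((PySem.Dict.mk issn).get? "_").map PySem.Str.strip | none => s.2)) := by
  induction xs using List.reverseRecOn generalizing s with
  | nil => simp
  | append_singleton xs x ih =>
    rw [List.foldl_append, ih s]
    simp only [List.foldl_cons, List.foldl_nil, List.reverse_append, List.reverse_singleton,
      List.singleton_append, List.find?_cons]
    unfold pvStepA
    by_cases hp : (PySem.Dict.mk x).get? "t" = some "PRINT"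
    · simp [hp, beq_iff_eq]
    · by_cases ho : (PySem.Dict.mk x).get? "t" = some "ONLIN"
      · simp [ho, hp, beq_iff_eq]
      · have hp' : ((PySem.Dict.mk x).get? "t" == some "PRINT") = false :=
          beq_eq_false_iff_ne.mpr hp
        have ho' : ((PySem.Dict.mk x).get? "t" == some "ONLIN") = false :=
          beq_eq_false_iff_ne.mpr ho
        simp [hp, ho, hp', ho']

-- ===== VERDICT (by name: the statement is the Claim_ definition above) =====
theorem extract_issn_print_electronic_spec : Claim_equal_extract_issn_print_electronic := by
  intro o _ _
  unfold Spec_extract_issn_print_electronic extract_issn_print_electronic extract_issn_print_electronic_alt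
  cases o with
  | none => rfl
  | some xs =>
    show xs.foldl pvStepA (none, none) = _
    rw [pvFoldA_eq_lastValue]
    simp [pvLastValue]
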